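-- pv_equiv track=rewrite | github.com/squidistaken/imperative-programming | Week 6/tricky.py | check_duplicates
-- ===== SOURCE A (Python) =====
-- def check_duplicates(_x):
--     lst_duplicates = [0] * 10
--     duplicate_num = 0
--
--     for i in str(_x):
--         lst_duplicates[int(i)] += 1
--     for j in lst_duplicates:
--         if j > 1:
--             duplicate_num += 1
--     if duplicate_num == 1:
--         return True
--     return False
-- ===== SOURCE B (Python) =====
-- def check_duplicates(_x):
--     digits = sorted(int(c) for c in str(_x))
--     runs = 0
--     while digits:
--         head = digits[0]
--         k = 1
--         while k < len(digits) and digits[k] == head: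
--             k += 1
--         if k > 1:
--             runs += 1
--         digits = digits[k:]
--     return runs == 1
-- ===== Notes on version B (the rewrite author's own statement) =====
-- stated objective: alternative
-- what changed: Replaces the fixed 10-slot frequency table plus table rescan with sort-then-scan: the digits are sorted and consecutive runs of length > 1 are counted in one pass.
import Mathlib
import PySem

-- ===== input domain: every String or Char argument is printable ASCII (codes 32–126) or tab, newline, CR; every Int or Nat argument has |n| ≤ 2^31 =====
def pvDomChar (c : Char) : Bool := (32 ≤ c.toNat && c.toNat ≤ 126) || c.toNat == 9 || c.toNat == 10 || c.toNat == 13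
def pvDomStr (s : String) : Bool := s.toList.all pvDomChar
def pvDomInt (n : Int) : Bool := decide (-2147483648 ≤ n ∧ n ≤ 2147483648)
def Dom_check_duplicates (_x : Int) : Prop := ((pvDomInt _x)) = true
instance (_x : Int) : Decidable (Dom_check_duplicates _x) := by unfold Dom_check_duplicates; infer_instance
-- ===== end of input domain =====

-- B replaces A's fixed 10-slot frequency table (tally then rescan the table) with
-- sort-then-scan over runs of equal digits; both raise ValueError on negative _x
-- (the '-' character), which Pre_ excludes.

-- int(i) for a single character i: some value iff i is a digit (ValueError = none)
def pvDigitVal (c : Char) : Int := (PySem.Int.ofChars? [c]).getD 0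

-- ===== PORT A =====
def check_duplicates (_x : Int) : Bool :=
  let lst0 : List Int := [0, 0, 0, 0, 0, 0, 0, 0, 0, 0]   -- [0] * 10
  -- for i in str(_x): lst_duplicates[int(i)] += 1   (int(i) raises on '-': outside Pre_)
  let lst := (PySem.Int.toChars _x).foldl
      (fun lst i => PySem.List.pySetD lst (pvDigitVal i)
        (PySem.List.pyGetD lst (pvDigitVal i) 0 + 1)) lst0
  -- for j in lst_duplicates: if j > 1: duplicate_num += 1
  let dup := lst.foldl (fun acc j => if j > 1 then acc + 1 else acc) (0 : Int)
  if dup = 1 then true else false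

-- ===== PORT B =====
-- the outer while loop: each iteration strips one maximal run of equal digits
def pvRuns : List Int → Int
  | [] => 0
  | d :: rest =>
    -- inner while: k counts the leading elements equal to head (k = 1 + |takeWhile|)
    let k : Int := 1 + ((rest.takeWhile (fun x => x == d)).length : Int)
    (if k > 1 then 1 else 0) + pvRuns (rest.dropWhile (fun x => x == d))
  termination_by l => l.length
  decreasing_by
    simp only [List.length_cons]
    exact Nat.lt_succ_of_le (List.Sublist.length_le (List.dropWhile_sublist _))

def check_duplicates_alt (_x : Int) : Bool :=
  let digits := PySem.List.sorted ((PySem.Int.toChars _x).map (fun c => pvDigitVal c)) (fun x => x)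
  decide (pvRuns digits = 1)

-- ===== PRECONDITION & SPEC =====
-- Pre_ excludes negative _x: str(_x) then contains '-', on which A's int(i) raises ValueError.
def Pre_check_duplicates (_x : Int) : Prop := 0 ≤ _x
instance (_x : Int) : Decidable (Pre_check_duplicates _x) := by unfold Pre_check_duplicates; infer_instance
def pvWitness_check_duplicates : Int := 1223334444

def Spec_check_duplicates (_x : Int) (out : Bool) : Prop := out = check_duplicates_alt _x
instance (_x : Int) (out : Bool) : Decidable (Spec_check_duplicates _x out) := by unfold Spec_check_duplicates; infer_instance

-- ===== CLAIM (what is proved, stated in full; the proofs are below) =====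
def Claim_equal_check_duplicates : Prop := ∀ (_x : Int), Dom_check_duplicates _x → Pre_check_duplicates _x → Spec_check_duplicates _x (check_duplicates _x)

-- ===== LEMMAS AND PROOFS =====

-- every character produced by Nat.toDigits 10 is a digit character
theorem pv_toDigitsCore_mem (f : Nat) : ∀ (n : Nat) (l : List Char) (c : Char),
    c ∈ Nat.toDigitsCore 10 f n l → c ∈ l ∨ ∃ k < 10, c = Nat.digitChar k := by
  induction f with
  | zero => intro n l c h; exact Or.inl h
  | succ f ih =>
    intro n l c h
    simp only [Nat.toDigitsCore] at h
    by_cases hn : n / 10 = 0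
    · rw [if_pos hn] at h
      rcases List.mem_cons.mp h with h | h
      · exact Or.inr ⟨n % 10, Nat.mod_lt _ (by norm_num), h⟩
      · exact Or.inl h
    · rw [if_neg hn] at h
      rcases ih (n / 10) (Nat.digitChar (n % 10) :: l) c h with h' | h'
      · rcases List.mem_cons.mp h' with h' | h'
        · exact Or.inr ⟨n % 10, Nat.mod_lt _ (by norm_num), h'⟩
        · exact Or.inl h'
      · exact Or.inr h'

theorem pv_digitVal_digitChar (k : Nat) (hk : k < 10) :
    pvDigitVal (Nat.digitChar k) = (k : Int) := by
  interval_cases k <;> decide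

theorem pv_digitVal_bound (_x : Int) (hx : 0 ≤ _x) :
    ∀ d ∈ (PySem.Int.toChars _x).map (fun c => pvDigitVal c), ∃ k : Nat, k < 10 ∧ d = (k : Int) := by
  intro d hd
  simp only [List.mem_map] at hd
  obtain ⟨c, hc, rfl⟩ := hd
  have hc' : c ∈ Nat.toDigits 10 _x.toNat := by
    simpa [PySem.Int.toChars, not_lt.mpr hx] using hc
  rcases pv_toDigitsCore_mem _ _ _ _ hc' with h | ⟨k, hk, rfl⟩
  · simp at h
  · exact ⟨k, hk, (pv_digitVal_digitChar k hk)⟩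

theorem pv_setD_natCast (xs : List Int) (k : Nat) (h : k < xs.length) (v : Int) :
    PySem.List.pySetD xs (k : Int) v = xs.set k v := by
  simp [PySem.List.pySetD, PySem.List.pySet?, PySem.List.pyIdx?, h]

-- one tallying step of A on a table (List.range 10).map f
theorem pv_table_step (f : Nat → Int) (k : Nat) (hk : k < 10) :
    PySem.List.pySetD ((List.range 10).map f) ((k : Nat) : Int)
      (PySem.List.pyGetD ((List.range 10).map f) ((k : Nat) : Int) 0 + 1)
      = (List.range 10).map (fun (j : Nat) => if j = k then f j + 1 else f j) := by
  rw [pv_setD_natCast _ _ (by simpa using hk)]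
  apply List.ext_getElem
  · simp
  · intro i h1 h2
    simp only [List.getElem_set, List.getElem_map, List.getElem_range]
    by_cases h : i = k
    · simp [h, PySem.List.pyGetD, hk]
    · simp only [if_neg h]
      rw [if_neg (fun hh => h hh.symm)]

theorem pv_table_fold (l : List Int) (hl : ∀ d ∈ l, ∃ k : Nat, k < 10 ∧ d = (k : Int)) (f : Nat → Int) :
    l.foldl (fun lst d => PySem.List.pySetD lst d (PySem.List.pyGetD lst d 0 + 1))
      ((List.range 10).map f)
      = (List.range 10).map (fun (j : Nat) => f j + (l.count ((j : Nat) : Int) : Int)) := by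
  induction l generalizing f with
  | nil => simp
  | cons d t ih =>
    obtain ⟨k, hk, rfl⟩ := hl d (List.mem_cons_self)
    simp only [List.foldl_cons]
    rw [pv_table_step f k hk, ih (fun e he => hl e (List.mem_cons_of_mem _ he))]
    apply List.map_congr_left
    intro j hj
    by_cases h : j = k
    · simp [h, List.count_cons]; ring
    · have h2 : ((j : Nat) : Int) ≠ ((k : Nat) : Int) := by exact_mod_cast h
      have h3 : ¬ k = j := fun hh => h hh.symm
      simp [h, h3, List.count_cons, h2]

theorem pv_count_fold (l : List Int) (a : Int) :
    l.foldl (fun acc j => if j > 1 then acc + 1 else acc) a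
      = a + (l.countP (fun j => decide (1 < j)) : Int) := by
  induction l generalizing a with
  | nil => simp
  | cons j t ih =>
    by_cases h : 1 < j <;> simp [List.countP_cons, h, ih] <;> ring

-- B's run scan on a sorted list counts the distinct values with count > 1
theorem pv_not_mem_dropWhile (d : Int) (rest : List Int)
    (hdle : ∀ x ∈ rest, d ≤ x) (hrp : rest.Pairwise (· ≤ ·)) :
    d ∉ rest.dropWhile (fun x => x == d) := by
  induction rest with
  | nil => simp
  | cons a t ihh =>
    by_cases ha : a = d
    · rw [List.dropWhile_cons_of_pos (by simp [ha])]
      exact ihh (fun x hx => hdle x (List.mem_cons_of_mem _ hx)) (List.pairwise_cons.mp hrp).2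
    · rw [List.dropWhile_cons_of_neg (by simp [ha])]
      intro hmem
      rcases List.mem_cons.mp hmem with h | h
      · exact ha h.symm
      · have h1 : d ≤ a := hdle a List.mem_cons_self
        have h2 : a ≤ d := (List.pairwise_cons.mp hrp).1 d h
        exact ha (le_antisymm h2 h1)

theorem pv_runs_sorted : ∀ (l : List Int), l.Pairwise (· ≤ ·) →
    pvRuns l = ((l.toFinset.filter (fun d => 1 < l.count d)).card : Int) := by
  intro l
  induction hn : l.length using Nat.strong_induction_on generalizing l with
  | _ n ih =>
  match l with
  | [] => intro _; simp [pvRuns]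
  | d :: rest =>
    intro hs
    subst hn
    have hdle : ∀ x ∈ rest, d ≤ x := fun x hx => (List.pairwise_cons.mp hs).1 x hx
    have hrp : rest.Pairwise (· ≤ ·) := (List.pairwise_cons.mp hs).2
    have hrest : rest = rest.takeWhile (fun x => x == d) ++ rest.dropWhile (fun x => x == d) :=
      (List.takeWhile_append_dropWhile).symm
    have ht1d : ∀ x ∈ rest.takeWhile (fun x => x == d), x = d := by
      intro x hx
      simpa using List.mem_takeWhile_imp hx
    have ht2p : (rest.dropWhile (fun x => x == d)).Pairwise (· ≤ ·) :=
      hrp.sublist (List.dropWhile_sublist _)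
    have hdt2 : d ∉ rest.dropWhile (fun x => x == d) := pv_not_mem_dropWhile d rest hdle hrp
    have hcd : (d :: rest).count d = 1 + (rest.takeWhile (fun x => x == d)).length := by
      rw [List.count_cons_self]
      conv_lhs => rw [hrest]
      rw [List.count_append]
      have h1 : (rest.takeWhile (fun x => x == d)).count d =
          (rest.takeWhile (fun x => x == d)).length :=
        List.count_eq_length.mpr (fun x hx => ((ht1d x hx) ▸ rfl))
      have h2 : (rest.dropWhile (fun x => x == d)).count d = 0 := List.count_eq_zero.mpr hdt2
      omega
    have hce : ∀ e, e ≠ d →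
        (d :: rest).count e = (rest.dropWhile (fun x => x == d)).count e := by
      intro e he
      have h1 : (rest.takeWhile (fun x => x == d)).count e = 0 :=
        List.count_eq_zero.mpr (fun hx => he (ht1d e hx))
      have h2 : rest.count e = (rest.dropWhile (fun x => x == d)).count e := by
        conv_lhs => rw [hrest]
        rw [List.count_append, h1, Nat.zero_add]
      simp [show ¬ d = e from fun h => he h.symm, h2]
    have ihr := ih (rest.dropWhile (fun x => x == d)).length (by
        have := List.Sublist.length_le (List.dropWhile_sublist (l := rest) (fun x => x == d))
        simp only [List.length_cons]; omega) _ rfl ht2p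
    have hset : (d :: rest).toFinset.filter (fun e => 1 < (d :: rest).count e)
        = (if 1 < (d :: rest).count d then {d} else ∅) ∪
          (rest.dropWhile (fun x => x == d)).toFinset.filter
            (fun e => 1 < (rest.dropWhile (fun x => x == d)).count e) := by
      ext e
      by_cases he : e = d
      · subst he
        simp only [Finset.mem_filter, List.mem_toFinset, Finset.mem_union]
        constructor
        · rintro ⟨-, hc⟩
          left; rw [if_pos hc]; exact Finset.mem_singleton_self _
        · rintro (hm | hm)
          · split_ifs at hm with hcond
            · exact ⟨List.mem_cons_self, hcond⟩
            · simp at hm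
          · exact absurd hm.1 hdt2
      · simp only [Finset.mem_filter, List.mem_toFinset, Finset.mem_union]
        rw [hce e he]
        constructor
        · rintro ⟨-, hc⟩
          exact Or.inr ⟨List.count_pos_iff.mp (by omega), hc⟩
        · rintro (hm | hm)
          · split_ifs at hm <;> simp at hm
            exact absurd hm he
          · refine ⟨?_, hm.2⟩
            rw [hrest]
            exact List.mem_cons_of_mem _ (List.mem_append_right _ hm.1)
    have hdisj : Disjoint (if 1 < (d :: rest).count d then ({d} : Finset Int) else ∅)
        ((rest.dropWhile (fun x => x == d)).toFinset.filter
          (fun e => 1 < (rest.dropWhile (fun x => x == d)).count e)) := by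
      split_ifs
      · simp only [Finset.disjoint_singleton_left, Finset.mem_filter, List.mem_toFinset]
        intro h
        exact hdt2 h.1
      · simp
    rw [pvRuns]
    rw [ihr, hset, Finset.card_union_of_disjoint hdisj]
    by_cases hc : 1 < (d :: rest).count d
    · have hgt : (1 : Int) + ((rest.takeWhile (fun x => x == d)).length : Int) > 1 := by
        rw [hcd] at hc; push_cast; omega
      rw [if_pos hgt, if_pos hc, Finset.card_singleton]
      push_cast
      ring
    · have hgt : ¬ ((1 : Int) + ((rest.takeWhile (fun x => x == d)).length : Int) > 1) := by
        rw [hcd] at hc; push_cast; omega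
      rw [if_neg hgt, if_neg hc, Finset.card_empty]
      push_cast
      ring

theorem pv_countP_card (ds : List Int) (hb : ∀ d ∈ ds, ∃ k : Nat, k < 10 ∧ d = (k:Int)) :
    (List.range 10).countP (fun j => decide (1 < ds.count ((j : Nat) : Int))) =
    (ds.toFinset.filter (fun e => 1 < ds.count e)).card := by
  rw [List.countP_eq_length_filter,
    ← List.toFinset_card_of_nodup ((List.nodup_range).filter _)]
  apply Finset.card_nbij' (i := fun j => ((j : Nat) : Int)) (j := fun e => e.toNat)
  · intro j hj
    simp only [Finset.mem_coe, List.mem_toFinset, List.mem_filter, List.mem_range,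
      decide_eq_true_eq] at hj
    simp only [Finset.mem_coe, Finset.mem_filter, List.mem_toFinset]
    exact ⟨List.count_pos_iff.mp (by omega), hj.2⟩
  · intro e he
    simp only [Finset.mem_coe, Finset.mem_filter, List.mem_toFinset] at he
    obtain ⟨k, hk, rfl⟩ := hb e he.1
    simp only [Finset.mem_coe, List.mem_toFinset, List.mem_filter, List.mem_range,
      decide_eq_true_eq, Int.toNat_natCast]
    exact ⟨hk, he.2⟩
  · intro j hj
    simp
  · intro e he
    simp only [Finset.mem_coe, Finset.mem_filter, List.mem_toFinset] at he
    obtain ⟨k, hk, rfl⟩ := hb e he.1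
    simp

-- ===== VERDICT (by name: the statement is the Claim_ definition above) =====
theorem check_duplicates_spec : Claim_equal_check_duplicates := by
  intro _x hdom hpre
  simp only [Spec_check_duplicates, check_duplicates, check_duplicates_alt]
  have hb := pv_digitVal_bound _x hpre
  have hfold : (PySem.Int.toChars _x).foldl (fun lst i => PySem.List.pySetD lst (pvDigitVal i)
        (PySem.List.pyGetD lst (pvDigitVal i) 0 + 1)) ((List.range 10).map (fun _ => (0:Int)))
      = ((PySem.Int.toChars _x).map (fun c => pvDigitVal c)).foldl
          (fun l d => PySem.List.pySetD l d (PySem.List.pyGetD l d 0 + 1))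
          ((List.range 10).map (fun _ => (0:Int))) :=
    (List.foldl_map (f := fun c => pvDigitVal c)
      (g := fun l d => PySem.List.pySetD l d (PySem.List.pyGetD l d 0 + 1))
      (l := PySem.Int.toChars _x) (init := (List.range 10).map (fun _ => (0:Int)))).symm
  rw [show ([0,0,0,0,0,0,0,0,0,0] : List Int) = (List.range 10).map (fun _ => (0:Int)) from rfl,
    hfold, pv_table_fold _ hb, pv_count_fold, List.countP_map]
  have hperm := PySem.List.sorted_perm ((PySem.Int.toChars _x).map (fun c => pvDigitVal c)) (fun x => x) false
  have hpair := PySem.List.sorted_pairwise ((PySem.Int.toChars _x).map (fun c => pvDigitVal c)) (fun x => x)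
  have hfs : (PySem.List.sorted ((PySem.Int.toChars _x).map (fun c => pvDigitVal c)) (fun x => x)).toFinset
      = ((PySem.Int.toChars _x).map (fun c => pvDigitVal c)).toFinset := by
    ext e; simp [List.mem_toFinset, hperm.mem_iff]
  rw [pv_runs_sorted _ hpair, hfs]
  have hcnt : ∀ e, (PySem.List.sorted ((PySem.Int.toChars _x).map (fun c => pvDigitVal c)) (fun x => x)).count e
      = ((PySem.Int.toChars _x).map (fun c => pvDigitVal c)).count e := hperm.count_eq
  simp only [hcnt]
  rw [show ((fun j => decide (1 < j)) ∘ fun (j : Nat) =>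
      (0 : Int) + ((((PySem.Int.toChars _x).map (fun c => pvDigitVal c)).count ((j : Nat) : Int) : Int)))
      = (fun (j : Nat) => decide (1 < (((PySem.Int.toChars _x).map (fun c => pvDigitVal c)).count ((j : Nat) : Int)))) from by
    funext j; simp]
  rw [pv_countP_card _ hb]
  by_cases h : ((((PySem.Int.toChars _x).map (fun c => pvDigitVal c)).toFinset.filter
      (fun e => 1 < ((PySem.Int.toChars _x).map (fun c => pvDigitVal c)).count e)).card : Int) = 1
  · simp [h]
  · simp only [zero_add] at *
    rw [if_neg h, eq_comm, decide_eq_false_iff_not]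
    exact fun hh => h hh
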